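-- pv_equiv track=rewrite | github.com/jacopo-j/advent-of-code-2017 | day11/code.py | part1
-- ===== SOURCE A (Python) =====
-- def part1(in_data):
--     instr = in_data.split(",")
--     pos = [0, 0, 0]
--     for i in instr:
--         if (i == "n"):
--             pos[0] += 1
--             pos[1] -= 1
--         elif (i == "s"):
--             pos[0] -= 1
--             pos[1] += 1
--         elif (i == "se"):
--             pos[0] -= 1
--             pos[2] += 1
--         elif (i == "ne"):
--             pos[1] -= 1
--             pos[2] += 1
--         elif (i == "sw"):
--             pos[1] += 1
--             pos[2] -= 1
--         elif (i == "nw"):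
--             pos[0] += 1
--             pos[2] -= 1
--     return int((abs(pos[0]) + abs(pos[1]) + abs(pos[2])) / 2)
-- ===== SOURCE B (Python) =====
-- def part1(in_data):
--     t = in_data.split(",")
--     pos0 = t.count("n") - t.count("s") + t.count("nw") - t.count("se")
--     pos1 = t.count("s") - t.count("n") + t.count("sw") - t.count("ne")
--     pos2 = t.count("se") + t.count("ne") - t.count("sw") - t.count("nw")
--     return (abs(pos0) + abs(pos1) + abs(pos2)) // 2
-- ===== Notes on version B (the rewrite author's own statement) =====
-- stated objective: simpler
-- what changed: Replaces A's per-token branching accumulation loop with a frequency tabulation: count each of the six direction tokens once, compute the three cube coordinates by closed-form arithmetic on the counts, then the same distance formula.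
import Mathlib
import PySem

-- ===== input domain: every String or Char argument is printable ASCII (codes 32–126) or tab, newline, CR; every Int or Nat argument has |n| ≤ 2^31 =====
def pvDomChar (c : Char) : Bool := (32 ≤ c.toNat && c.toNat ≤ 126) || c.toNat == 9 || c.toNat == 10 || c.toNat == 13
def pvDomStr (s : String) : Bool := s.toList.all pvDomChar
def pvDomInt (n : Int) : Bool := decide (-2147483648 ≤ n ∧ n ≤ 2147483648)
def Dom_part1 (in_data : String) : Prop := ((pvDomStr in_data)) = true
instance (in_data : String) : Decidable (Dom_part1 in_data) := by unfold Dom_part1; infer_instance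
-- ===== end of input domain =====

-- B replaces A's per-token branching accumulation loop with per-direction token counts
-- and closed-form coordinate arithmetic (objective: simpler).


-- ===== PORT A =====
-- Python's final `int((|p0|+|p1|+|p2|)/2)` truncates; the operand is nonnegative and
-- always even (each move keeps p0+p1+p2 = 0), so floor division is exact here.
def part1Step (p : Int × Int × Int) (i : String) : Int × Int × Int :=
  if i = "n" then (p.1 + 1, p.2.1 - 1, p.2.2)
  else if i = "s" then (p.1 - 1, p.2.1 + 1, p.2.2)
  else if i = "se" then (p.1 - 1, p.2.1, p.2.2 + 1)
  else if i = "ne" then (p.1, p.2.1 - 1, p.2.2 + 1)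
  else if i = "sw" then (p.1, p.2.1 + 1, p.2.2 - 1)
  else if i = "nw" then (p.1 + 1, p.2.1, p.2.2 - 1)
  else p

def part1 (in_data : String) : Int :=
  let instr := (PySem.Str.split? in_data ",").getD []
  let pos := instr.foldl part1Step (0, 0, 0)
  PySem.Int.floordiv (|pos.1| + |pos.2.1| + |pos.2.2|) 2

-- ===== PORT B =====
def part1_alt (in_data : String) : Int :=
  let t := (PySem.Str.split? in_data ",").getD []
  let pos0 : Int := (PySem.List.count t "n") - (PySem.List.count t "s")
      + (PySem.List.count t "nw") - (PySem.List.count t "se")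
  let pos1 : Int := (PySem.List.count t "s") - (PySem.List.count t "n")
      + (PySem.List.count t "sw") - (PySem.List.count t "ne")
  let pos2 : Int := (PySem.List.count t "se") + (PySem.List.count t "ne")
      - (PySem.List.count t "sw") - (PySem.List.count t "nw")
  PySem.Int.floordiv (|pos0| + |pos1| + |pos2|) 2

-- ===== PRECONDITION & SPEC =====
def Spec_part1 (in_data : String) (out : Int) : Prop := out = part1_alt in_data
instance (in_data : String) (out : Int) : Decidable (Spec_part1 in_data out) := by unfold Spec_part1; infer_instance

-- ===== CLAIM (what is proved, stated in full; the proofs are below) =====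
def Claim_equal_part1 : Prop := ∀ (in_data : String), Dom_part1 in_data → Spec_part1 in_data (part1 in_data)

-- ===== LEMMAS AND PROOFS =====
lemma part1_fold_eq (l : List String) : ∀ (a b c : Int),
    l.foldl part1Step (a, b, c) =
      (a + l.count "n" - l.count "s" - l.count "se" + l.count "nw",
       b - l.count "n" + l.count "s" - l.count "ne" + l.count "sw",
       c + l.count "se" + l.count "ne" - l.count "sw" - l.count "nw") := by
  induction l with
  | nil => intro a b c; simp
  | cons h t ih =>
    intro a b c
    simp only [List.foldl_cons, part1Step]
    split_ifs with h1 h2 h3 h4 h5 h6 <;>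
      first
        | (subst h1; rw [ih]; simp [Prod.ext_iff]; omega)
        | (subst h2; rw [ih]; simp [Prod.ext_iff]; omega)
        | (subst h3; rw [ih]; simp [Prod.ext_iff]; omega)
        | (subst h4; rw [ih]; simp [Prod.ext_iff]; omega)
        | (subst h5; rw [ih]; simp [Prod.ext_iff]; omega)
        | (subst h6; rw [ih]; simp [Prod.ext_iff]; omega)
        | (rw [ih]; simp [h1, h2, h3, h4, h5, h6])

-- ===== VERDICT (by name: the statement is the Claim_ definition above) =====
theorem part1_spec : Claim_equal_part1 := by
  intro s _
  unfold Spec_part1 part1 part1_alt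
  simp only [part1_fold_eq, PySem.List.count_eq]
  ring_nf
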